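-- pv_equiv track=rewrite | github.com/dexter2406/course_ics_analysis | cal_filter.py | split_ics
-- ===== SOURCE A (Python) =====
-- def unfold_lines(text: str) -> list[str]:
--     """Merge RFC 5545 folded continuation lines."""
--     result = []
--     for raw in text.splitlines():
--         if raw[:1] in (" ", "\t") and result:
--             result[-1] += raw[1:]
--         else:
--             result.append(raw)
--     return result
--
-- def extract_props(vevent_text: str) -> dict[str, str]:
--     """
--     Return a key→value dict for all properties in a VEVENT block.
--     Handles folded lines and ;PARAM=VALUE key variants.
--     First occurrence of each key wins (important for DTSTART).
--     """
--     props: dict[str, str] = {}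
--     for line in unfold_lines(vevent_text):
--         if ":" not in line:
--             continue
--         key_part, _, value = line.partition(":")
--         key = key_part.split(";")[0].strip().upper()
--         if key not in props:
--             props[key] = value.strip()
--     return props
--
-- def split_ics(content: str) -> tuple[list[str], list[tuple[str, dict]], list[str]]:
--     """
--     Split ICS file content into:
--       header  — lines before the first BEGIN:VEVENT
--       events  — list of (raw_block_text, props_dict)
--       footer  — lines after the last END:VEVENT
--
--     Raw blocks are preserved verbatim (no content change).
--     """
--     header: list[str] = []
--     footer: list[str] = []
--     events: list[tuple[str, dict]] = []
--
--     in_vevent = False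
--     header_done = False
--     current_lines: list[str] = []
--     trailing: list[str] = []  # lines after the most recent END:VEVENT
--
--     for raw_line in content.splitlines(keepends=True):
--         stripped = raw_line.rstrip("\r\n")
--
--         if stripped == "BEGIN:VEVENT":
--             header_done = True
--             in_vevent = True
--             current_lines = [raw_line]
--             trailing = []  # reset; anything before this was footer candidate
--         elif stripped == "END:VEVENT" and in_vevent:
--             current_lines.append(raw_line)
--             block_text = "".join(current_lines)
--             events.append((block_text, extract_props(block_text)))
--             in_vevent = False
--             current_lines = []
--         elif in_vevent:
--             current_lines.append(raw_line)
--         elif not header_done: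
--             header.append(raw_line)
--         else:
--             trailing.append(raw_line)
--
--     footer = trailing
--     return header, events, footer
-- ===== SOURCE B (Python) =====
-- def unfold_lines(text: str) -> list[str]:
--     """Merge RFC 5545 folded continuation lines."""
--     result = []
--     for raw in text.splitlines():
--         if raw[:1] in (" ", "\t") and result:
--             result[-1] += raw[1:]
--         else:
--             result.append(raw)
--     return result
--
-- def extract_props(vevent_text: str) -> dict[str, str]:
--     props: dict[str, str] = {}
--     for line in unfold_lines(vevent_text):
--         if ":" not in line:
--             continue
--         key_part, _, value = line.partition(":")
--         key = key_part.split(";")[0].strip().upper()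
--         if key not in props:
--             props[key] = value.strip()
--     return props
--
-- def _span(pred, xs):
--     """Longest prefix of xs satisfying pred, and the remainder."""
--     i = 0
--     while i < len(xs) and pred(xs[i]):
--         i += 1
--     return xs[:i], xs[i:]
--
-- def split_ics(content: str) -> tuple[list[str], list[tuple[str, dict]], list[str]]:
--     lines = content.splitlines(keepends=True)
--
--     def is_begin(l):
--         return l.rstrip("\r\n") == "BEGIN:VEVENT"
--
--     def is_end(l):
--         return l.rstrip("\r\n") == "END:VEVENT"
--
--     header, rest = _span(lambda l: not is_begin(l), lines)
--     events = []
--     trailing = []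
--     while rest:
--         begin_line, tl = rest[0], rest[1:]
--         mid, rest2 = _span(lambda l: not is_begin(l) and not is_end(l), tl)
--         if not rest2:
--             break                      # unterminated block: no footer
--         if is_begin(rest2[0]):
--             rest = rest2               # a new BEGIN discards the open block
--             continue
--         block = "".join([begin_line] + mid + [rest2[0]])
--         events.append((block, extract_props(block)))
--         tr, rest3 = _span(lambda l: not is_begin(l), rest2[1:])
--         if not rest3:
--             trailing = tr              # run after the last END
--             break
--         rest = rest3
--     return header, events, trailing
-- ===== Notes on version B (the rewrite author's own statement) =====
-- stated objective: alternative
-- what changed: split_ics is rewritten as a block-directed parser: span off the header up to the first BEGIN:VEVENT, then repeatedly scan the begin-headed remainder for the matching END (or a resetting BEGIN) and slice out whole blocks, instead of A's per-line boolean state machine; unfold_lines/extract_props are kept verbatim.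
import Mathlib
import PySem

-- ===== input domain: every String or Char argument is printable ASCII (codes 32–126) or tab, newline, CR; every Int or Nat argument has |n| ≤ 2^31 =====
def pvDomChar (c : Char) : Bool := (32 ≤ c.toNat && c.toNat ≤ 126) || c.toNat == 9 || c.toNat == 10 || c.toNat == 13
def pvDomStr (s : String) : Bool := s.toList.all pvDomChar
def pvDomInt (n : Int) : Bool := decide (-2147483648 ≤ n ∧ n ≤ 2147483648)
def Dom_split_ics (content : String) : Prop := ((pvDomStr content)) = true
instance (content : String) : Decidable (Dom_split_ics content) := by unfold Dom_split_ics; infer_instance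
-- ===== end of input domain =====

-- B rewrites split_ics as a block-directed span/slice parser (header span, then per-block scans)
-- instead of A's per-line state machine; helpers unfold_lines/extract_props are shared verbatim.
-- Objective: alternative decomposition (same asymptotic cost).

-- ===== SHARED HELPERS (identical lines in Source A and Source B) =====

-- hand port of str.splitlines(keepends=True): exact on Dom_split_ics, where the only
-- line-break characters present are '\n', '\r' and the pair '\r\n'
def splitKeep : List Char → List Char → List (List Char)
  | [], cur => if cur = [] then [] else [cur]
  | '\r' :: '\n' :: rest, cur => (cur ++ ['\r', '\n']) :: splitKeep rest []
  | '\r' :: rest, cur => (cur ++ ['\r']) :: splitKeep rest []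
  | '\n' :: rest, cur => (cur ++ ['\n']) :: splitKeep rest []
  | c :: rest, cur => splitKeep rest (cur ++ [c])

-- hand port of s.rstrip("\r\n") (strip the given chars from the right): exact
def rstripCRLF (l : List Char) : List Char :=
  (l.reverse.dropWhile (fun c => c == '\r' || c == '\n')).reverse

-- port of unfold_lines (both files contain it verbatim)
def unfoldLines (text : List Char) : List (List Char) :=
  (PySem.Chars.splitlines text).foldl
    (fun result raw =>
      if (raw.take 1 == [' '] || raw.take 1 == ['\t']) && !result.isEmpty then
        result.dropLast ++ [result.getLast! ++ raw.drop 1]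
      else
        result ++ [raw])
    []

-- port of extract_props (both files contain it verbatim);
-- line.partition(":") is hand-ported as takeWhile/dropWhile at the first ':' — exact here
-- because the branch is guarded by ':' ∈ line; key_part.split(";")[0] never fails (split is
-- nonempty), so the [0] indexing is ported with headD
def extractProps (vevent : List Char) : PySem.Dict String String :=
  (unfoldLines vevent).foldl
    (fun props line =>
      if line.contains ':' then
        let keyPart := line.takeWhile (fun c => c ≠ ':')
        let value := (line.dropWhile (fun c => c ≠ ':')).drop 1
        let key := String.ofList (PySem.Chars.upper (PySem.Chars.strip
          ((PySem.Chars.splitOn keyPart (";".toList)).headD [])))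
        if props.contains key then props
        else props.insert key (String.ofList (PySem.Chars.strip value))
      else props)
    (PySem.Dict.mk [])

-- an event entry (raw_block_text, props-dict-as-association-list)
def pvEvent (block : List Char) : String × List (String × String) :=
  (String.ofList block, (extractProps block).items)

-- ===== PORT A =====

structure PvStA where
  header : List (List Char)
  events : List (String × List (String × String))
  inV : Bool
  hdone : Bool
  cur : List (List Char)
  trailing : List (List Char)

def stepA (st : PvStA) (raw : List Char) : PvStA :=
  let stripped := rstripCRLF raw
  if stripped = "BEGIN:VEVENT".toList then
    { st with hdone := true, inV := true, cur := [raw], trailing := [] }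
  else if stripped = "END:VEVENT".toList ∧ st.inV then
    let block := (st.cur ++ [raw]).flatten
    { st with events := st.events ++ [pvEvent block], inV := false, cur := [] }
  else if st.inV then
    { st with cur := st.cur ++ [raw] }
  else if ¬ st.hdone then
    { st with header := st.header ++ [raw] }
  else
    { st with trailing := st.trailing ++ [raw] }

def split_ics (content : String) : List String × (List (String × (List (String × String)))) × List String :=
  let lines := splitKeep content.toList []
  let st := lines.foldl stepA ⟨[], [], false, false, [], []⟩
  (st.header.map String.ofList, st.events, st.trailing.map String.ofList)

-- ===== PORT B =====

def isBegin (l : List Char) : Bool := rstripCRLF l == "BEGIN:VEVENT".toList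
def isEnd (l : List Char) : Bool := rstripCRLF l == "END:VEVENT".toList

-- Source B's while-loop over the remaining begin-headed suffix; _span(pred, xs) is ported as
-- takeWhile/dropWhile of the same predicate
def bLoop : List (List Char) → List (String × List (String × String)) →
    List (String × List (String × String)) × List (List Char)
  | [], events => (events, [])
  | b :: tl, events =>
    let mid := tl.takeWhile (fun l => !isBegin l && !isEnd l)
    match h2 : tl.dropWhile (fun l => !isBegin l && !isEnd l) with
    | [] => (events, [])                        -- unterminated block: no footer
    | e :: tl2 =>
      if isBegin e then
        bLoop (e :: tl2) events                 -- a new BEGIN discards the open block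
      else
        let events' := events ++ [pvEvent (([b] ++ (mid ++ [e])).flatten)]
        match h3 : tl2.dropWhile (fun l => !isBegin l) with
        | [] => (events', tl2.takeWhile (fun l => !isBegin l))   -- run after the last END
        | b2 :: tl3 => bLoop (b2 :: tl3) events'
termination_by l _ => l.length
decreasing_by
  · have h := List.length_dropWhile_le (fun l => !isBegin l && !isEnd l) tl
    rw [h2] at h; simp at h ⊢; omega
  · have h := List.length_dropWhile_le (fun l => !isBegin l && !isEnd l) tl
    rw [h2] at h
    have h' := List.length_dropWhile_le (fun l => !isBegin l) tl2
    rw [h3] at h'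
    simp at h h' ⊢; omega

def split_ics_alt (content : String) : List String × (List (String × (List (String × String)))) × List String :=
  let lines := splitKeep content.toList []
  let header := lines.takeWhile (fun l => !isBegin l)
  let rest := lines.dropWhile (fun l => !isBegin l)
  let r := bLoop rest []
  (header.map String.ofList, r.1, r.2.map String.ofList)

-- ===== PRECONDITION & SPEC =====
def Spec_split_ics (content : String) (out : List String × (List (String × (List (String × String)))) × List String) : Prop := out = split_ics_alt content
instance (content : String) (out : List String × (List (String × (List (String × String)))) × List String) : Decidable (Spec_split_ics content out) := by unfold Spec_split_ics; infer_instance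

-- ===== CLAIM (what is proved, stated in full; the proofs are below) =====
def Claim_equal_split_ics : Prop := ∀ (content : String), Dom_split_ics content → Spec_split_ics content (split_ics content)

-- ===== LEMMAS AND PROOFS =====

theorem pv_head_dropWhile {α : Type} (p : α → Bool) (l : List α) (x : α) (r : List α)
    (h : l.dropWhile p = x :: r) : p x = false := by
  have := List.head?_dropWhile_not p l
  rw [h] at this; simpa using this

theorem bLoop_eq1 (b tl e) (h : tl.dropWhile (fun l => !isBegin l && !isEnd l) = []) :
    bLoop (b :: tl) e = (e, []) := by
  rw [bLoop]
  split
  · rfl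
  · rename_i x tl2 heq
    rw [h] at heq; cases heq

theorem bLoop_eq2 (b tl e x tl2) (h : tl.dropWhile (fun l => !isBegin l && !isEnd l) = x :: tl2)
    (hb : isBegin x = true) : bLoop (b :: tl) e = bLoop (x :: tl2) e := by
  rw [bLoop]
  split
  · rename_i heq; rw [h] at heq; cases heq
  · rename_i x' tl2' heq
    rw [h] at heq; cases heq
    rw [if_pos hb]

theorem bLoop_eq3a (b tl e x tl2) (h : tl.dropWhile (fun l => !isBegin l && !isEnd l) = x :: tl2)
    (hb : isBegin x = false) (h2 : tl2.dropWhile (fun l => !isBegin l) = []) :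
    bLoop (b :: tl) e = (e ++ [pvEvent (([b] ++ (tl.takeWhile (fun l => !isBegin l && !isEnd l) ++ [x])).flatten)],
      tl2.takeWhile (fun l => !isBegin l)) := by
  rw [bLoop]
  split
  · rename_i heq; rw [h] at heq; cases heq
  · rename_i x' tl2' heq
    rw [h] at heq; cases heq
    rw [if_neg (by simp [hb])]
    split
    · rfl
    · rename_i b2 tl3 heq2; rw [h2] at heq2; cases heq2

theorem bLoop_eq3b (b tl e x tl2 b2 tl3) (h : tl.dropWhile (fun l => !isBegin l && !isEnd l) = x :: tl2)
    (hb : isBegin x = false) (h2 : tl2.dropWhile (fun l => !isBegin l) = b2 :: tl3) :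
    bLoop (b :: tl) e = bLoop (b2 :: tl3)
      (e ++ [pvEvent (([b] ++ (tl.takeWhile (fun l => !isBegin l && !isEnd l) ++ [x])).flatten)]) := by
  rw [bLoop]
  split
  · rename_i heq; rw [h] at heq; cases heq
  · rename_i x' tl2' heq
    rw [h] at heq; cases heq
    rw [if_neg (by simp [hb])]
    split
    · rename_i heq2; rw [h2] at heq2; cases heq2
    · rename_i b2' tl3' heq2; rw [h2] at heq2; cases heq2; rfl

-- header phase of A's state machine: lines are collected into header until the first BEGIN
theorem pv_hdrPhase (lines : List (List Char)) : ∀ (h : List (List Char)) e c t,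
    List.foldl stepA ⟨h, e, false, false, c, t⟩ lines =
      (match lines.dropWhile (fun l => !isBegin l) with
       | [] => ⟨h ++ lines, e, false, false, c, t⟩
       | b :: rest =>
         List.foldl stepA ⟨h ++ lines.takeWhile (fun l => !isBegin l), e, true, true, [b], []⟩ rest) := by
  induction lines with
  | nil => simp
  | cons l ls ih =>
    intro h e c t
    by_cases hb : isBegin l = true
    · have hb' : rstripCRLF l = "BEGIN:VEVENT".toList := by simpa [isBegin] using hb
      simp [hb, List.foldl_cons, stepA, hb']
    · have hb' : ¬ rstripCRLF l = "BEGIN:VEVENT".toList := by simpa [isBegin] using hb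
      simp only [List.foldl_cons, stepA, hb', if_false, List.dropWhile_cons, List.takeWhile_cons]
      simp [hb, ih, List.append_assoc]

-- inside a VEVENT: lines accumulate into cur until a BEGIN (reset) or an END (emit event)
theorem pv_insidePhase (lines : List (List Char)) : ∀ (h : List (List Char)) e c,
    List.foldl stepA ⟨h, e, true, true, c, []⟩ lines =
      (match lines.dropWhile (fun l => !isBegin l && !isEnd l) with
       | [] => ⟨h, e, true, true, c ++ lines, []⟩
       | x :: rest =>
         if isBegin x then
           List.foldl stepA ⟨h, e, true, true, [x], []⟩ rest
         else
           List.foldl stepA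
             ⟨h, e ++ [pvEvent ((c ++ (lines.takeWhile (fun l => !isBegin l && !isEnd l) ++ [x])).flatten)],
              false, true, [], []⟩ rest) := by
  induction lines with
  | nil => simp
  | cons l ls ih =>
    intro h e c
    by_cases hb : isBegin l = true
    · have hb' : rstripCRLF l = "BEGIN:VEVENT".toList := by simpa [isBegin] using hb
      simp [hb, List.foldl_cons, stepA, hb']
    · have hb' : ¬ rstripCRLF l = "BEGIN:VEVENT".toList := by simpa [isBegin] using hb
      by_cases he : isEnd l = true
      · have he' : rstripCRLF l = "END:VEVENT".toList := by simpa [isEnd] using he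
        simp [hb, he, List.foldl_cons, stepA, he']
      · have he' : ¬ rstripCRLF l = "END:VEVENT".toList := by simpa [isEnd] using he
        simp only [List.foldl_cons, stepA, hb', he', if_false, if_true, List.dropWhile_cons,
          List.takeWhile_cons]
        simp [hb, he, ih, List.append_assoc]

-- after an END: lines accumulate into trailing until the next BEGIN (which resets trailing)
theorem pv_trailPhase (lines : List (List Char)) : ∀ (h : List (List Char)) e t,
    List.foldl stepA ⟨h, e, false, true, [], t⟩ lines =
      (match lines.dropWhile (fun l => !isBegin l) with
       | [] => ⟨h, e, false, true, [], t ++ lines⟩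
       | b :: rest => List.foldl stepA ⟨h, e, true, true, [b], []⟩ rest) := by
  induction lines with
  | nil => simp
  | cons l ls ih =>
    intro h e t
    by_cases hb : isBegin l = true
    · have hb' : rstripCRLF l = "BEGIN:VEVENT".toList := by simpa [isBegin] using hb
      simp [hb, List.foldl_cons, stepA, hb']
    · have hb' : ¬ rstripCRLF l = "BEGIN:VEVENT".toList := by simpa [isBegin] using hb
      simp only [List.foldl_cons, stepA, hb', if_false, List.dropWhile_cons]
      simp [hb, ih, List.append_assoc]

-- the core correspondence: A's machine after consuming a BEGIN line b computes what bLoop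
-- computes on the begin-headed suffix b :: tl
theorem pv_main (n : Nat) : ∀ (tl : List (List Char)), tl.length ≤ n → ∀ (b : List Char), isBegin b = true →
    ∀ (h : List (List Char)) e,
    ((List.foldl stepA ⟨h, e, true, true, [b], []⟩ tl).header,
     (List.foldl stepA ⟨h, e, true, true, [b], []⟩ tl).events,
     (List.foldl stepA ⟨h, e, true, true, [b], []⟩ tl).trailing) =
      (h, (bLoop (b :: tl) e).1, (bLoop (b :: tl) e).2) := by
  induction n with
  | zero =>
    intro tl htl b hb h e
    have : tl = [] := List.eq_nil_of_length_eq_zero (Nat.le_zero.mp htl)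
    subst this
    rw [bLoop_eq1 b [] e (by simp)]
    simp
  | succ n ih =>
    intro tl htl b hb h e
    rw [pv_insidePhase]
    rcases hdw : tl.dropWhile (fun l => !isBegin l && !isEnd l) with _ | ⟨x, rest⟩
    · rw [bLoop_eq1 b tl e hdw]
    · have hlen : rest.length + 1 ≤ tl.length := by
        have := List.length_dropWhile_le (fun l => !isBegin l && !isEnd l) tl
        rw [hdw] at this; simpa using this
      by_cases hbx : isBegin x = true
      · rw [bLoop_eq2 b tl e x rest hdw hbx]
        simp only [hbx, if_true]
        exact ih rest (by omega) x hbx h e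
      · simp only [hbx, if_false, Bool.false_eq_true]
        rw [pv_trailPhase]
        rcases hdw2 : rest.dropWhile (fun l => !isBegin l) with _ | ⟨b2, tl3⟩
        · have htw : rest.takeWhile (fun l => !isBegin l) = rest := by
            have := List.takeWhile_append_dropWhile (p := fun l => !isBegin l) (l := rest)
            rw [hdw2] at this; simpa using this
          rw [bLoop_eq3a b tl e x rest hdw (by simpa using hbx) hdw2]
          simp [htw]
        · have hb2 : isBegin b2 = true := by
            have := pv_head_dropWhile _ rest b2 tl3 hdw2
            simpa using this
          have hlen2 : tl3.length + 1 ≤ rest.length := by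
            have := List.length_dropWhile_le (fun l => !isBegin l) rest
            rw [hdw2] at this; simpa using this
          rw [bLoop_eq3b b tl e x rest b2 tl3 hdw (by simpa using hbx) hdw2]
          exact ih tl3 (by omega) b2 hb2 h _

-- ===== VERDICT (by name: the statement is the Claim_ definition above) =====
theorem split_ics_spec : Claim_equal_split_ics := by
  intro content _
  simp only [Spec_split_ics, split_ics, split_ics_alt]
  rw [pv_hdrPhase]
  rcases hdw : (splitKeep content.toList []).dropWhile (fun l => !isBegin l) with _ | ⟨b, rest⟩
  · have htw : (splitKeep content.toList []).takeWhile (fun l => !isBegin l) = splitKeep content.toList [] := by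
      have := List.takeWhile_append_dropWhile (p := fun l => !isBegin l) (l := splitKeep content.toList [])
      rw [hdw] at this; simpa using this
    simp [htw, bLoop]
  · have hb : isBegin b = true := by
      have := pv_head_dropWhile _ _ b rest hdw
      simpa using this
    have hm := pv_main rest.length rest (le_refl _) b hb
      ((splitKeep content.toList []).takeWhile (fun l => !isBegin l)) []
    simp only [Prod.mk.injEq] at hm
    simp [hm.1, hm.2.1, hm.2.2]
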